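-- pv_equiv track=rewrite | github.com/jangseungwon08/coding-test | 프로그래머스/0/181874. A 강조하기/A 강조하기.py | solution
-- ===== SOURCE A (Python) =====
-- def solution(myString):
--     answer = ''
--     #myString을 전체 소문자로 변환해준다.
--     myString = myString.lower()
--     #myString을 for문을 돌린 뒤
--     for i in myString:
--         #a의 아스키 코드값이 97이다. 따라서 ord(i) == 97이면
--         if ord(i) == 97:
--             #a를 A로 바꿔준다.
--             answer += i.upper()
--             #a가 아니면 그냥 answer값에 더해준다.
--         else:
--             answer += i
--
--     return answer
-- ===== SOURCE B (Python) =====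
-- def solution(myString):
--     return myString.lower().replace('a', 'A')
-- ===== Notes on version B (the rewrite author's own statement) =====
-- stated objective: idiomatic
-- what changed: Replaces the explicit per-character loop with its ord()==97 branch and string accumulator by a single whole-string replace('a','A') after lower().
import Mathlib
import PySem

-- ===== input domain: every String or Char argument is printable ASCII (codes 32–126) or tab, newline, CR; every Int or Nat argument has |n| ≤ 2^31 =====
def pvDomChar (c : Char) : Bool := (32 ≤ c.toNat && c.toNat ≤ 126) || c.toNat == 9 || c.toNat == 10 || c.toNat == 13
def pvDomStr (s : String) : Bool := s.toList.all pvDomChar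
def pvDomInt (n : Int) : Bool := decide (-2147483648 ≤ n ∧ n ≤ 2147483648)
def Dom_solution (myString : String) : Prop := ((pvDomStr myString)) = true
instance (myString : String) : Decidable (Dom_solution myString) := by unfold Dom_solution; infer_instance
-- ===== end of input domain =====

-- B lowercases the string and does one whole-string replace('a','A'), dropping A's per-character loop, ord()==97 branch and string accumulator (objective: idiomatic).

-- ===== PORT A =====
-- the for-loop over the lowered string: answer += i.upper() if ord(i) == 97 else i
def solution (myString : String) : String :=
  String.ofList ((PySem.Str.lower myString).toList.foldl
    (fun answer i =>
      if i.toNat == 97 then answer ++ [PySem.Chars.upperChar i] else answer ++ [i]) [])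

-- ===== PORT B =====
def solution_alt (myString : String) : String :=
  PySem.Str.replace (PySem.Str.lower myString) "a" "A"

-- ===== PRECONDITION & SPEC =====
def Spec_solution (myString : String) (out : String) : Prop := out = solution_alt myString
instance (myString : String) (out : String) : Decidable (Spec_solution myString out) := by unfold Spec_solution; infer_instance

-- ===== CLAIM (what is proved, stated in full; the proofs are below) =====
def Claim_equal_solution : Prop := ∀ (myString : String), Dom_solution myString → Spec_solution myString (solution myString)

-- ===== LEMMAS AND PROOFS =====

-- the per-character transformation both programs perform
def pvSubst (c : Char) : Char := if c.toNat == 97 then PySem.Chars.upperChar c else c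

theorem pvFoldA (cs : List Char) (acc : List Char) :
    cs.foldl (fun answer i =>
      if i.toNat == 97 then answer ++ [PySem.Chars.upperChar i] else answer ++ [i]) acc
    = acc ++ cs.map pvSubst := by
  induction cs generalizing acc with
  | nil => simp
  | cons c t ih =>
    rw [List.foldl_cons, List.map_cons]
    by_cases h : (c.toNat == 97) = true <;>
      simp only [ih, pvSubst, h, if_pos, if_neg, Bool.false_eq_true, not_false_eq_true,
        List.append_assoc, List.singleton_append]

theorem pvCharEq (c : Char) : (c.toNat == 97) = (c == 'a') := by
  rw [Bool.eq_iff_iff, beq_iff_eq, beq_iff_eq, Char.ext_iff, Char.toNat]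
  constructor
  · intro h; exact UInt32.toNat_inj.mp (h.trans (by decide))
  · intro h; rw [h]; decide

theorem pvGoReplace (fuel : Nat) (l acc : List Char) (hf : l.length ≤ fuel) :
    PySem.Chars.replace.go ['a'] ['A'] fuel l acc = acc.reverse ++ l.map pvSubst := by
  induction fuel generalizing l acc with
  | zero =>
    interval_cases hl : l.length
    simp_all [PySem.Chars.replace.go, List.length_eq_zero_iff.mp hl]
  | succ n ih =>
    cases l with
    | nil => simp [PySem.Chars.replace.go]
    | cons c t =>
      have hf' : t.length ≤ n := Nat.le_of_succ_le_succ (by simpa using hf)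
      simp only [PySem.Chars.replace.go, List.isPrefixOf, Bool.and_true]
      by_cases h : c = 'a'
      · subst h
        rw [if_pos (by decide), show List.drop ['a'].length ('a' :: t) = t from rfl,
          ih _ _ hf']
        simp [show pvSubst 'a' = 'A' from by decide]
      · rw [if_neg (by simp [Ne.symm h]), ih _ _ hf']
        have hc : (c.toNat == 97) = false := by rw [pvCharEq]; simpa using h
        simp [pvSubst, hc]

theorem pvReplaceMap (cs : List Char) :
    PySem.Chars.replace cs ['a'] ['A'] = cs.map pvSubst := by
  rw [PySem.Chars.replace]
  simp only [List.isEmpty_cons, if_neg Bool.false_ne_true]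
  simpa using pvGoReplace cs.length cs [] le_rfl

-- ===== VERDICT (by name: the statement is the Claim_ definition above) =====
theorem solution_spec : Claim_equal_solution := by
  intro s _
  unfold Spec_solution solution solution_alt
  apply String.ext
  rw [String.toList_ofList, PySem.Str.toList_replace, pvFoldA]
  have ha : ("a" : String).toList = ['a'] := rfl
  have hA : ("A" : String).toList = ['A'] := rfl
  rw [ha, hA, pvReplaceMap]
  simp
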